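-- pv_equiv track=rewrite | github.com/Starvard/life-manager | services/card_store.py | _rebuild_days_preserving_fills
-- ===== SOURCE A (Python) =====
-- def _rebuild_days_preserving_fills(
--     old_days: list,
--     target_sched: list[int],
-- ) -> list:
--     """Rebuild the ``days`` grid around ``target_sched`` without losing fills.
--
--     The previous rebuild code dropped ``True`` cells that used to sit in the
--     bonus tail (``days[d]`` longer than ``scheduled[d]``). That cost users
--     real completions whenever the planner shifted a task to a different day.
--     This helper keeps every ``True`` cell: scheduled-slot fills are aligned
--     Mon→Sun, then any remaining fills are appended as bonus slots per day.
--     """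
--     old_days = old_days or []
--     filled_per_day: list[int] = []
--     for d in range(7):
--         row = old_days[d] if d < len(old_days) else []
--         filled_per_day.append(sum(1 for v in (row or []) if v))
--
--     new_days: list[list[bool]] = []
--     for d in range(7):
--         ns = target_sched[d] if d < len(target_sched) else 0
--         base = max(ns, 1)
--         f = filled_per_day[d]
--         total = max(base, f)
--         row = [False] * total
--         for i in range(min(ns, f)):
--             row[i] = True
--         for i in range(max(0, f - ns)):
--             row[ns + i] = True
--         new_days.append(row)
--     return new_days
-- ===== SOURCE B (Python) =====
-- def _rebuild_days_preserving_fills(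
--     old_days: list,
--     target_sched: list[int],
-- ) -> list:
--     """Recursively consume both lists head-first for 7 days; each day's row is
--     a comprehension comparing the 0-based slot index against the day's
--     fill count (row.count(True)), so no index assignment and no prepass."""
--     def go(days, sched, remaining):
--         if remaining == 0:
--             return []
--         f = days[0].count(True) if days else 0
--         ns = sched[0] if sched else 0
--         row = [i < f for i in range(max(ns, 1, f))]
--         return [row] + go(days[1:] if days else [], sched[1:] if sched else [], remaining - 1)
--     return go(old_days or [], target_sched, 7)
-- ===== Notes on version B (the rewrite author's own statement) =====
-- stated objective: alternative
-- what changed: B replaces A's two staged index-driven passes (a fill-count prepass over range(7), then a False-filled row mutated by two index-assignment loops) with a head-first recursion that consumes both lists simultaneously, building each row in one comprehension that compares the slot index against row.count(True).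
import Mathlib
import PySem

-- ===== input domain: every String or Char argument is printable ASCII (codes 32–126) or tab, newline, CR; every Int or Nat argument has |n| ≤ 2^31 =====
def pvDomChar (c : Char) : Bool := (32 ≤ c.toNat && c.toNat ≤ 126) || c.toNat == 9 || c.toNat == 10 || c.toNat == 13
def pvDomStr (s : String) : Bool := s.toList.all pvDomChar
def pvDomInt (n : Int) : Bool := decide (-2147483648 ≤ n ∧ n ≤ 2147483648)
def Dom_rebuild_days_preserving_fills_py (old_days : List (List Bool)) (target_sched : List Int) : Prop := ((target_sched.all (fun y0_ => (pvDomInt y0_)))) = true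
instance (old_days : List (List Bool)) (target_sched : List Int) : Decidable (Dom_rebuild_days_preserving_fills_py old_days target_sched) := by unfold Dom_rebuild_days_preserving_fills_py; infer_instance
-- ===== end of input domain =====

-- B replaces A's two index-driven passes (fill-count prepass, then rows mutated by two
-- index-assignment loops) with a head-first recursion over both lists that builds each row
-- by comparing the slot index with the day's True count (objective: alternative).

-- ===== PORT A =====
-- sum(1 for v in row if v)
def pvCountTrue (row : List Bool) : Int :=
  row.foldl (fun acc v => if v then acc + 1 else acc) 0

def rebuild_days_preserving_fills_py (old_days : List (List Bool)) (target_sched : List Int) : List (List Bool) :=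
  let old_days' := if old_days = [] then [] else old_days      -- old_days = old_days or []
  let filled_per_day : List Int :=
    (List.range 7).foldl (fun acc d =>
      let row := if d < old_days'.length then old_days'.getD d [] else []
      let rowOr := if row = [] then [] else row                 -- (row or [])
      acc ++ [pvCountTrue rowOr]) []
  (List.range 7).foldl (fun new_days d =>
    let ns : Int := if d < target_sched.length then target_sched.getD d 0 else 0
    let base := max ns 1
    let f := filled_per_day.getD d 0
    let total := max base f
    let row0 := List.replicate total.toNat false
    -- row[i] = True index assignments: exact for the in-range nonnegative indices Pre_ guarantees
    let row1 := (List.range (min ns f).toNat).foldl (fun r i => r.set i true) row0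
    let row2 := (List.range (max 0 (f - ns)).toNat).foldl (fun r i => r.set (ns + (i : Int)).toNat true) row1
    new_days ++ [row2]) []

-- ===== PORT B =====
-- the inner recursion `go(days, sched, remaining)` of Source B
def pvGo (days : List (List Bool)) (sched : List Int) : Nat → List (List Bool)
  | 0 => []
  | n + 1 =>
    let f : Int := match days with | [] => 0 | r :: _ => ((r.count true : Nat) : Int)
    let ns : Int := match sched with | [] => 0 | x :: _ => x
    let row := (List.range (max (max ns 1) f).toNat).map (fun (i : Nat) => decide ((i : Int) < f))
    row :: pvGo days.tail sched.tail n

def rebuild_days_preserving_fills_py_alt (old_days : List (List Bool)) (target_sched : List Int) : List (List Bool) :=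
  pvGo (if old_days = [] then [] else old_days) target_sched 7    -- go(old_days or [], target_sched, 7)

-- ===== PRECONDITION & SPEC =====
-- Pre_ restricts to the natural domain of nonnegative scheduled counts: on a negative count A
-- either raises IndexError or fills cells through Python's negative-index wraparound.
def Pre_rebuild_days_preserving_fills_py (old_days : List (List Bool)) (target_sched : List Int) : Prop :=
  ∀ x ∈ target_sched.take 7, 0 ≤ x
instance (old_days : List (List Bool)) (target_sched : List Int) : Decidable (Pre_rebuild_days_preserving_fills_py old_days target_sched) := by unfold Pre_rebuild_days_preserving_fills_py; infer_instance

def pvWitness_rebuild_days_preserving_fills_py : List (List Bool) × List Int :=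
  ([[true, false, true], [false]], [2, 1, 5])

def Spec_rebuild_days_preserving_fills_py (old_days : List (List Bool)) (target_sched : List Int) (out : List (List Bool)) : Prop := out = rebuild_days_preserving_fills_py_alt old_days target_sched
instance (old_days : List (List Bool)) (target_sched : List Int) (out : List (List Bool)) : Decidable (Spec_rebuild_days_preserving_fills_py old_days target_sched out) := by unfold Spec_rebuild_days_preserving_fills_py; infer_instance

-- ===== CLAIM (what is proved, stated in full; the proofs are below) =====
def Claim_equal_rebuild_days_preserving_fills_py : Prop := ∀ (old_days : List (List Bool)) (target_sched : List Int), Dom_rebuild_days_preserving_fills_py old_days target_sched → Pre_rebuild_days_preserving_fills_py old_days target_sched → Spec_rebuild_days_preserving_fills_py old_days target_sched (rebuild_days_preserving_fills_py old_days target_sched)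

-- ===== LEMMAS AND PROOFS =====

-- fold-with-append is a map (element equality needed only on members)
theorem pv_foldl_push {α β : Type} (F : List β → α → List β) (g : α → β) :
    ∀ (l : List α), (∀ a d, d ∈ l → F a d = a ++ [g d]) →
      ∀ (acc : List β), l.foldl F acc = acc ++ l.map g := by
  intro l
  induction l with
  | nil => intro _ acc; simp
  | cons x xs ih =>
    intro hF acc
    simp only [List.foldl_cons, List.map_cons]
    rw [hF acc x (by simp), ih (fun a d hd => hF a d (by simp [hd]))]
    simp

theorem pvCountTrue_eq (row : List Bool) :
    pvCountTrue row = ((row.filter id).length : Int) := by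
  have h : ∀ (l : List Bool) (acc : Int),
      l.foldl (fun acc v => if v then acc + 1 else acc) acc = acc + ((l.filter id).length : Int) := by
    intro l
    induction l with
    | nil => simp
    | cons v vs ih =>
      intro acc
      cases v <;> simp [ih] <;> ring
  simpa [pvCountTrue] using h row 0

-- row.count(True) agrees with A's truthy sum after the `(row or [])` normalisation
theorem pv_count_eq_countTrue (row : List Bool) :
    ((row.count true : Nat) : Int) = pvCountTrue (if row = [] then [] else row) := by
  by_cases h : row = []
  · simp [h, pvCountTrue]
  · rw [if_neg h, pvCountTrue_eq]
    have key : ∀ l : List Bool, l.count true = (l.filter id).length := by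
      intro l
      induction l with
      | nil => rfl
      | cons v vs ih => cases v <;> simp [ih]
    rw [key]

-- the guarded index in A equals plain getD
theorem pv_if_getD {α : Type} (l : List α) (d : Nat) (x : α) :
    (if d < l.length then l.getD d x else x) = l.getD d x := by
  by_cases h : d < l.length
  · rw [if_pos h]
  · rw [if_neg h, List.getD_eq_default _ _ (by omega)]

-- B's recursion unrolled to an indexed map
theorem pvGo_eq_map :
    ∀ (n : Nat) (days : List (List Bool)) (sched : List Int),
      pvGo days sched n = (List.range n).map (fun d =>
        (List.range
            (max (max (sched.getD d 0) 1) (((days.getD d []).count true : Nat) : Int)).toNat).map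
          (fun (i : Nat) => decide ((i : Int) < (((days.getD d []).count true : Nat) : Int)))) := by
  intro n
  induction n with
  | zero => intro days sched; simp [pvGo]
  | succ n ih =>
    intro days sched
    rw [List.range_succ_eq_map, List.map_cons, List.map_map]
    simp only [pvGo]
    rw [ih days.tail sched.tail]
    have hf : (match days with | [] => (0 : Int) | r :: _ => ((r.count true : Nat) : Int))
        = ((((days.getD 0 []).count true : Nat)) : Int) := by
      cases days <;> simp [List.getD]
    have hns : (match sched with | [] => (0 : Int) | x :: _ => x) = sched.getD 0 0 := by
      cases sched <;> simp [List.getD]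
    simp only [hf, hns]
    congr 1
    apply List.map_congr_left
    intro d _
    simp

-- setting a contiguous block of indices just after the True prefix
theorem pv_set_fold (a : Nat) :
    ∀ (c rest : Nat), c ≤ rest →
      (List.range c).foldl (fun r i => r.set (a + i) true)
          (List.replicate a true ++ List.replicate rest false)
        = List.replicate (a + c) true ++ List.replicate (rest - c) false := by
  intro c
  induction c with
  | zero => intro rest _; simp
  | succ c ih =>
    intro rest hc
    rw [List.range_succ, List.foldl_append, ih rest (Nat.le_of_succ_le hc)]
    have hrc : rest - c = (rest - (c + 1)) + 1 := by omega
    rw [hrc, List.replicate_succ]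
    simp only [List.foldl_cons, List.foldl_nil]
    rw [List.set_append]
    simp only [List.length_replicate]
    rw [if_neg (by omega)]
    have : a + c - (a + c) = 0 := by omega
    rw [this, List.set_cons_zero]
    rw [show a + (c + 1) = (a + c) + 1 from rfl, List.replicate_succ']
    simp

-- a True-prefix row equals the index-comparison row of the same length
theorem pv_replicate_eq_map_lt (f : Int) (T : Nat) (hf : 0 ≤ f) (hfT : f.toNat ≤ T) :
    List.replicate f.toNat true ++ List.replicate (T - f.toNat) false
      = (List.range T).map (fun (i : Nat) => decide ((i : Int) < f)) := by
  apply List.ext_getElem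
  · simp only [List.length_append, List.length_replicate, List.length_map, List.length_range]
    omega
  · intro i h1 h2
    simp only [List.getElem_map, List.getElem_range]
    by_cases hif : i < f.toNat
    · rw [List.getElem_append_left (by simpa using hif), List.getElem_replicate]
      have hp : ((i : Int) < f) := by omega
      simp [hp]
    · rw [List.getElem_append_right (by simpa using hif), List.getElem_replicate]
      have hp : ¬ ((i : Int) < f) := by omega
      simp [hp]

-- A's two index-assignment loops produce exactly B's comparison row
theorem pv_row_eq (ns f : Int) (hns : 0 ≤ ns) (hf : 0 ≤ f) :
    (List.range (max 0 (f - ns)).toNat).foldl (fun r i => r.set (ns + (i : Int)).toNat true)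
        ((List.range (min ns f).toNat).foldl (fun r i => r.set i true)
          (List.replicate (max (max ns 1) f).toNat false))
      = (List.range (max (max ns 1) f).toNat).map (fun (i : Nat) => decide ((i : Int) < f)) := by
  set T : Nat := (max (max ns 1) f).toNat with hT
  have hfT : f.toNat ≤ T := by omega
  have hnT : ns.toNat ≤ T := by omega
  have hfold1 : ∀ (c : Nat), c ≤ T →
      (List.range c).foldl (fun r i => r.set i true) (List.replicate T false)
        = List.replicate c true ++ List.replicate (T - c) false := by
    intro c hc
    have h := pv_set_fold 0 c T hc
    simpa using h
  rw [← pv_replicate_eq_map_lt f T hf hfT]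
  by_cases hcase : f ≤ ns
  · have h1 : (min ns f).toNat = f.toNat := by omega
    have h2 : (max 0 (f - ns)).toNat = 0 := by omega
    rw [h1, h2, hfold1 f.toNat hfT]
    simp
  · have h1 : (min ns f).toNat = ns.toNat := by omega
    have h2 : (max 0 (f - ns)).toNat = f.toNat - ns.toNat := by omega
    have hfn : (fun (r : List Bool) (i : Nat) => r.set (ns + (i : Int)).toNat true)
        = fun (r : List Bool) (i : Nat) => r.set (ns.toNat + i) true := by
      funext r i
      congr 1
      omega
    rw [h1, h2, hfold1 ns.toNat hnT, hfn,
      pv_set_fold ns.toNat (f.toNat - ns.toNat) (T - ns.toNat) (by omega)]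
    congr 2 <;> omega

-- ===== VERDICT (by name: the statement is the Claim_ definition above) =====
theorem rebuild_days_preserving_fills_py_spec : Claim_equal_rebuild_days_preserving_fills_py := by
  intro old_days target_sched _hDom hPre
  unfold Spec_rebuild_days_preserving_fills_py
  unfold rebuild_days_preserving_fills_py rebuild_days_preserving_fills_py_alt
  set old' : List (List Bool) := if old_days = [] then [] else old_days with hold'
  set cnt : Nat → Int := fun d => (((old'.getD d []).count true : Nat) : Int) with hcnt
  -- A's filled_per_day list is the map of cnt over range 7
  have hfilled :
      (List.range 7).foldl (fun acc d =>
        let row := if d < old'.length then old'.getD d [] else []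
        let rowOr := if row = [] then [] else row
        acc ++ [pvCountTrue rowOr]) []
      = (List.range 7).map cnt := by
    rw [pv_foldl_push _ cnt (List.range 7) (fun a d _ => by
      simp only [pv_if_getD]
      rw [hcnt]
      simp only []
      rw [pv_count_eq_countTrue])]
    simp
  simp only [hfilled]
  rw [pvGo_eq_map]
  rw [pv_foldl_push _ (fun d =>
        (List.range (max (max (target_sched.getD d 0) 1) (cnt d)).toNat).map
          (fun (i : Nat) => decide ((i : Int) < cnt d)))
      (List.range 7) ?_ []]
  · simp [hcnt]
  · intro a d hd
    have hd7 : d < 7 := by simpa [List.mem_range] using hd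
    simp only []
    congr 1
    have hget : ((List.range 7).map cnt).getD d 0 = cnt d := by
      rw [List.getD_eq_getElem _ _ (by simpa using hd7)]
      simp
    have hnsg : (if d < target_sched.length then target_sched.getD d 0 else 0)
        = target_sched.getD d 0 := pv_if_getD _ _ _
    have hns : 0 ≤ target_sched.getD d 0 := by
      by_cases hdl : d < target_sched.length
      · have hmem : target_sched.getD d 0 ∈ target_sched.take 7 := by
          rw [List.getD_eq_getElem _ _ hdl]
          have hlt : d < (target_sched.take 7).length := by
            simp [List.length_take]; omega
          have := List.getElem_mem hlt
          simpa [List.getElem_take] using this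
        exact hPre _ hmem
      · rw [List.getD_eq_default _ _ (by omega)]
    have hf : 0 ≤ cnt d := by positivity
    rw [hget, hnsg, pv_row_eq (target_sched.getD d 0) (cnt d) hns hf]
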